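-- pv_equiv track=rewrite | github.com/zeyker/alien_rest | wsgi.py | count_match
-- ===== SOURCE A (Python) =====
-- def count_match(arr, words, len_word):
--
--     counter = 0
--     for word in words:
--         checker = True
--         for i in range( 0,len_word):
--             if word[i] not in arr[i]:
--                 checker = False
--                 break
--         if checker:
--             counter += 1
--     return counter
-- ===== SOURCE B (Python) =====
-- def count_match(arr, words, len_word):
--     candidates = list(words)
--     for i in range(len_word):
--         if not candidates:
--             break
--         col = arr[i]
--         candidates = [w for w in candidates if w[i] in col]
--     return len(candidates)
-- ===== Notes on version B (the rewrite author's own statement) =====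
-- stated objective: alternative
-- what changed: Inverted the loop nesting: instead of a per-word inner scan with a boolean-and-break, B iterates over positions and keeps a shrinking list of surviving candidate words, returning its final length.
import Mathlib
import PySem

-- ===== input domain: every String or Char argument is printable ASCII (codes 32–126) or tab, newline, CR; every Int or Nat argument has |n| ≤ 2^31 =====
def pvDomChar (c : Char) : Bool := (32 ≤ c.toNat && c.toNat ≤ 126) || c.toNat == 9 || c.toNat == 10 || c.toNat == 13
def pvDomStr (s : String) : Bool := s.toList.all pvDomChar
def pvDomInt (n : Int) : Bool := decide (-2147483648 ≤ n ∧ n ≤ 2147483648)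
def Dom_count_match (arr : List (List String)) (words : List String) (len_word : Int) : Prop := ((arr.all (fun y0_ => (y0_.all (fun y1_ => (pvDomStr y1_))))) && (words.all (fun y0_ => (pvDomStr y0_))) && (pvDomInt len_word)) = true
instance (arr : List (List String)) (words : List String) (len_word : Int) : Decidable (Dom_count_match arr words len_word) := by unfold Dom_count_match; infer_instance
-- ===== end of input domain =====

-- B differs from A by inverting the loop nesting (positions outer, a shrinking candidate list inner); equal return value, no side effects.

-- ===== PORT A =====
-- inner loop of A: 'for i in range(0, len_word)' with checker-and-break (fuel = remaining iterations, i = current index)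
def pvChkA (arr : List (List String)) (word : String) : Nat → Int → Bool
  | 0, _ => true
  | n + 1, i =>
    match PySem.Str.pyGet? word i, PySem.List.pyGet? arr i with
    | some c, some col => if String.singleton c ∈ col then pvChkA arr word n (i + 1) else false
    | _, _ => false   -- Python raises IndexError here; excluded by Pre_count_match

def count_match (arr : List (List String)) (words : List String) (len_word : Int) : Int :=
  words.foldl (fun counter word =>
    if pvChkA arr word len_word.toNat 0 then counter + 1 else counter) 0

-- ===== PORT B =====
-- column loop of B: filter the candidate list at each position, with the empty-break
def pvGo (arr : List (List String)) : Nat → Int → List String → Int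
  | 0, _, cands => (cands.length : Int)
  | n + 1, i, cands =>
    if cands.isEmpty then (cands.length : Int)
    else
      let col := (PySem.List.pyGet? arr i).getD []
      pvGo arr n (i + 1) (cands.filter (fun w =>
        match PySem.Str.pyGet? w i with
        | some c => decide (String.singleton c ∈ col)
        | none => false))   -- Python raises IndexError here; excluded by Pre_count_match

def count_match_alt (arr : List (List String)) (words : List String) (len_word : Int) : Int :=
  pvGo arr len_word.toNat 0 words

-- ===== PRECONDITION & SPEC =====
-- one checked step of A's inner test (in range on both sides, and the character matches)
def pvKeep (arr : List (List String)) (w : String) (i : Nat) : Bool :=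
  match w.toList[i]?, arr[i]? with
  | some c, some col => decide (String.singleton c ∈ col)
  | _, _ => false

-- Pre_ excludes exactly the inputs on which the Python A raises IndexError: A raises on a word w
-- iff every position below m := min(|w|,|arr|) is in range and matches and len_word still asks for
-- a position ≥ m; so A returns normally iff each word either covers the whole range (len_word ≤ m)
-- or fails a match at some position below m.
def Pre_count_match (arr : List (List String)) (words : List String) (len_word : Int) : Prop :=
  ∀ w ∈ words, len_word ≤ ((min w.length arr.length : Nat) : Int) ∨
    ∃ j ∈ List.range (min w.length arr.length), pvKeep arr w j = false
instance (arr : List (List String)) (words : List String) (len_word : Int) : Decidable (Pre_count_match arr words len_word) := by unfold Pre_count_match; infer_instance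

def pvWitness_count_match : List (List String) × List String × Int :=
  ([["a", "b"], ["c"]], ["ac", "bc", "bx", "x"], 2)

def Spec_count_match (arr : List (List String)) (words : List String) (len_word : Int) (out : Int) : Prop := out = count_match_alt arr words len_word
instance (arr : List (List String)) (words : List String) (len_word : Int) (out : Int) : Decidable (Spec_count_match arr words len_word out) := by unfold Spec_count_match; infer_instance

-- ===== CLAIM (what is proved, stated in full; the proofs are below) =====
def Claim_equal_count_match : Prop := ∀ (arr : List (List String)) (words : List String) (len_word : Int), Dom_count_match arr words len_word → Pre_count_match arr words len_word → Spec_count_match arr words len_word (count_match arr words len_word)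

-- ===== LEMMAS AND PROOFS =====

-- B's per-column filter predicate coincides with A's per-step test (both give false out of range)
def pvPred (arr : List (List String)) (i : Int) (w : String) : Bool :=
  ((PySem.Str.pyGet? w i).bind (fun c =>
    (PySem.List.pyGet? arr i).map (fun col => decide (String.singleton c ∈ col)))).getD false

theorem pvPred_eq_filter (arr : List (List String)) (i : Int) :
    (fun w => match PySem.Str.pyGet? w i with
      | some c => decide (String.singleton c ∈ (PySem.List.pyGet? arr i).getD [])
      | none => false) = pvPred arr i := by
  funext w
  cases hw : PySem.List.pyGet? w.toList i with
  | none => simp [pvPred, PySem.Str.pyGet?, hw]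
  | some c =>
    cases ha : PySem.List.pyGet? arr i with
    | none => simp [pvPred, PySem.Str.pyGet?, hw, ha]
    | some col => simp [pvPred, PySem.Str.pyGet?, hw, ha]

theorem pvChkA_succ (arr : List (List String)) (w : String) (n : Nat) (i : Int) :
    pvChkA arr w (n + 1) i = (pvPred arr i w && pvChkA arr w n (i + 1)) := by
  rw [pvChkA]
  cases hw : PySem.List.pyGet? w.toList i with
  | none => simp [pvPred, PySem.Str.pyGet?, hw]
  | some c =>
    cases ha : PySem.List.pyGet? arr i with
    | none => simp [pvPred, PySem.Str.pyGet?, hw, ha]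
    | some col =>
      by_cases h : String.singleton c ∈ col <;> simp [pvPred, PySem.Str.pyGet?, hw, ha, h]

theorem pvGo_eq_countP (arr : List (List String)) (n : Nat) :
    ∀ (i : Int) (cands : List String),
      pvGo arr n i cands = ((cands.countP (fun w => pvChkA arr w n i)) : Int) := by
  induction n with
  | zero => intro i cands; simp [pvGo, pvChkA, List.countP_true]
  | succ n ih =>
    intro i cands
    by_cases h : cands = []
    · subst h; simp [pvGo]
    · have hne : cands.isEmpty = false := by simpa [List.isEmpty_iff] using h
      rw [pvGo]
      simp only [hne, Bool.false_eq_true, if_false]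
      rw [ih, pvPred_eq_filter, List.countP_filter]
      congr 1
      refine List.countP_congr (fun w _ => ?_)
      rw [pvChkA_succ, Bool.and_comm]

-- ===== VERDICT (by name: the statement is the Claim_ definition above) =====
theorem count_match_spec : Claim_equal_count_match := by
  intro arr words len_word _ _
  unfold Spec_count_match count_match count_match_alt
  rw [pvGo_eq_countP, PySem.List.foldl_if_add_one, Int.zero_add]
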